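-- pv_equiv track=rewrite | github.com/Pratham-Pandey/Snake_Game | main.py | bound_calc
-- ===== SOURCE A (Python) =====
-- def bound_calc(var):
--         n = var
--         bound_final = 0
--         c = 0
--
--         while n > 0:
--             bound_mid = n % 10
--             if c > 0:
--                 bound_final = bound_final * 10 + bound_mid
--             n = n // 10
--             c = c + 1
--
--         bound_mid = 0
--         bound_super_final = 0
--
--         while bound_final > 0:
--             bound_mid = bound_final % 10
--             bound_super_final = bound_super_final * 10 + bound_mid
--             bound_final = bound_final // 10
--
--         return var//bound_super_final
-- ===== SOURCE B (Python) =====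
-- def bound_calc(var):
--     return var // (var // 10)
-- ===== Notes on version B (the rewrite author's own statement) =====
-- stated objective: simpler
-- what changed: Replaces A's two digit-reversal while-loops with the closed form var // (var // 10); A's double reversal silently drops trailing zeros of var//10, which B does not reproduce (stated as D_).
-- intended difference: On three-or-more-digit inputs whose second-lowest digit is zero, A divides by var//10 with its trailing zeros stripped (returning a much larger quotient), while B divides by var//10 itself, the intended 'var divided by var with last digit removed'. — e.g. on bound_calc(105): A returns 105, B returns 10
import Mathlib
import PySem

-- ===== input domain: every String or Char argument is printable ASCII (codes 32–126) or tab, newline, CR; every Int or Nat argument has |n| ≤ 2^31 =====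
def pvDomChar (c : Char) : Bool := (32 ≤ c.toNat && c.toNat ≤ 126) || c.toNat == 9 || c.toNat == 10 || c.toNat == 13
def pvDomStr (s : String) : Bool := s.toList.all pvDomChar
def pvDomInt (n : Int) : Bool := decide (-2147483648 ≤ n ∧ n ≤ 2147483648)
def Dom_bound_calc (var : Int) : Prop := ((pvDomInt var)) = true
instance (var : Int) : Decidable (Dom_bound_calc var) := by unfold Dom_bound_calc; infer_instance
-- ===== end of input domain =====

-- B replaces A's two digit-reversal while-loops with the closed form var // (var // 10) (simpler).

-- ===== PORT A =====
-- first while loop of A (fuel bounds the iteration count; it never runs out for fuel = n.toNat)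
def bound_calc_loop1 : Nat → Int → Int → Int → Int
  | 0, _, bound_final, _ => bound_final
  | fuel+1, n, bound_final, c =>
    if n > 0 then
      bound_calc_loop1 fuel (PySem.Int.floordiv n 10)
        (if c > 0 then bound_final * 10 + PySem.Int.mod n 10 else bound_final) (c + 1)
    else bound_final

-- second while loop of A
def bound_calc_loop2 : Nat → Int → Int → Int
  | 0, _, bound_super_final => bound_super_final
  | fuel+1, bound_final, bound_super_final =>
    if bound_final > 0 then
      bound_calc_loop2 fuel (PySem.Int.floordiv bound_final 10)
        (bound_super_final * 10 + PySem.Int.mod bound_final 10)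
    else bound_super_final

def bound_calc (var : Int) : Int :=
  let bound_final := bound_calc_loop1 var.toNat var 0 0
  let bound_super_final := bound_calc_loop2 bound_final.toNat bound_final 0
  PySem.Int.floordiv var bound_super_final

-- ===== PORT B =====
def bound_calc_alt (var : Int) : Int :=
  PySem.Int.floordiv var (PySem.Int.floordiv var 10)

-- ===== PRECONDITION & SPEC =====
-- Pre_ excludes exactly the non-positive and the single-digit inputs, on which A raises ZeroDivisionError (its stripped divisor stays 0).
def Pre_bound_calc (var : Int) : Prop := 10 ≤ var
instance (var : Int) : Decidable (Pre_bound_calc var) := by unfold Pre_bound_calc; infer_instance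
def pvWitness_bound_calc : Int := (42)

-- On three-or-more-digit inputs whose second-lowest digit is zero, A's double digit reversal
-- strips the trailing zeros of var//10 before dividing, while B divides by var//10 itself,
-- the intended "var divided by var with its last digit removed".
def D_bound_calc (var : Int) : Prop :=
  100 ≤ var ∧ PySem.Int.mod (PySem.Int.floordiv var 10) 10 = 0
instance (var : Int) : Decidable (D_bound_calc var) := by unfold D_bound_calc; infer_instance

def Spec_bound_calc (var : Int) (out : Int) : Prop := ¬ D_bound_calc var → out = bound_calc_alt var
instance (var : Int) (out : Int) : Decidable (Spec_bound_calc var out) := by unfold Spec_bound_calc; infer_instance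

def pvDiffWitness_bound_calc : Int := (105)
def pvDiffWitnessOut_bound_calc : Int × Int := (105, 10)

-- ===== CLAIM (what is proved, stated in full; the proofs are below) =====
def Claim_unchanged_bound_calc : Prop := ∀ (var : Int), Dom_bound_calc var → Pre_bound_calc var → Spec_bound_calc var (bound_calc var)
def Claim_changed_bound_calc : Prop := Dom_bound_calc (pvDiffWitness_bound_calc) ∧ Pre_bound_calc (pvDiffWitness_bound_calc) ∧ D_bound_calc (pvDiffWitness_bound_calc) ∧ bound_calc (pvDiffWitness_bound_calc) = pvDiffWitnessOut_bound_calc.1 ∧ bound_calc_alt (pvDiffWitness_bound_calc) = pvDiffWitnessOut_bound_calc.2 ∧ pvDiffWitnessOut_bound_calc.1 ≠ pvDiffWitnessOut_bound_calc.2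

-- ===== LEMMAS AND PROOFS =====

-- the value computed by both loops, with digits lowest-first: a reversal accumulator
def pvRev (n : Nat) : Nat := Nat.ofDigits 10 (Nat.digits 10 n).reverse

theorem pvLoop1_eq_loop2 (fuel : Nat) : ∀ (n b c : Int), 0 < c →
    bound_calc_loop1 fuel n b c = bound_calc_loop2 fuel n b := by
  induction fuel with
  | zero => intro n b c _; rfl
  | succ fuel ih =>
    intro n b c hc
    simp only [bound_calc_loop1, bound_calc_loop2]
    by_cases hn : n > 0
    · simp only [hn, if_true, if_pos hc]
      exact ih _ _ _ (by omega)
    · simp [hn]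

theorem pvLoop2_spec (fuel : Nat) : ∀ (n : Nat) (a : Int), n < 10 ^ fuel →
    bound_calc_loop2 fuel (n : Int) a
      = a * 10 ^ (Nat.digits 10 n).length + (pvRev n : Int) := by
  induction fuel with
  | zero =>
    intro n a h
    have hn : n = 0 := by simpa using h
    subst hn
    simp [bound_calc_loop2, pvRev]
  | succ fuel ih =>
    intro n a h
    by_cases hn : 0 < n
    · have hpos : ((n : Int) > 0) := by exact_mod_cast hn
      have hfd : PySem.Int.floordiv (n : Int) 10 = ((n / 10 : Nat) : Int) := by
        exact_mod_cast PySem.Int.floordiv_natCast n 10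
      have hmd : PySem.Int.mod (n : Int) 10 = ((n % 10 : Nat) : Int) := by
        exact_mod_cast PySem.Int.mod_natCast n 10
      have hlt : n / 10 < 10 ^ fuel := by
        rw [Nat.div_lt_iff_lt_mul (by norm_num : 0 < 10)]
        calc n < 10 ^ (fuel + 1) := h
          _ = 10 ^ fuel * 10 := by ring
      have hdig : Nat.digits 10 n = n % 10 :: Nat.digits 10 (n / 10) :=
        Nat.digits_def' (by norm_num) hn
      have hrev : (pvRev n : Int)
          = (pvRev (n / 10) : Int) + 10 ^ (Nat.digits 10 (n / 10)).length * ((n % 10 : Nat) : Int) := by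
        unfold pvRev
        rw [hdig]
        have : (n % 10 :: Nat.digits 10 (n / 10)).reverse
            = (Nat.digits 10 (n / 10)).reverse ++ [n % 10] := by simp
        rw [this, Nat.ofDigits_append]
        push_cast [Nat.ofDigits_singleton]
        simp [List.length_reverse]
      simp only [bound_calc_loop2, hpos, if_true, hfd, hmd]
      rw [ih _ _ hlt, hdig, hrev]
      push_cast
      simp only [List.length_cons, pow_succ]
      ring
    · have hn0 : n = 0 := by omega
      subst hn0
      simp [bound_calc_loop2, pvRev]

theorem pvRev_rev (n : Nat) (hn : 0 < n) (h10 : n % 10 ≠ 0) : pvRev (pvRev n) = n := by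
  have hdig : Nat.digits 10 (pvRev n) = (Nat.digits 10 n).reverse := by
    unfold pvRev
    refine Nat.digits_ofDigits 10 (by norm_num) _ ?_ ?_
    · intro l hl
      exact Nat.digits_lt_base (by norm_num) (List.mem_reverse.mp hl)
    · intro h
      rw [List.getLast_reverse]
      have : (Nat.digits 10 n).head? = some (n % 10) := by
        rw [Nat.digits_def' (by norm_num : (1:Nat) < 10) hn]; rfl
      intro hc
      have hne : Nat.digits 10 n ≠ [] := by
        intro he; rw [he] at this; simp at this
      have := List.head?_eq_some_head hne ▸ this
      exact h10 (by simp_all)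
  show Nat.ofDigits 10 (Nat.digits 10 (pvRev n)).reverse = n
  rw [hdig, List.reverse_reverse, Nat.ofDigits_digits]

theorem pvBound_final_eq (var : Int) (h : 10 ≤ var) :
    bound_calc_loop1 var.toNat var 0 0 = (pvRev (var.toNat / 10) : Int) := by
  obtain ⟨k, hk⟩ : ∃ k, var.toNat = k + 1 := ⟨var.toNat - 1, by omega⟩
  have hvar : var = ((var.toNat : Nat) : Int) := by omega
  have hpos : var > 0 := by omega
  have hfd : PySem.Int.floordiv var 10 = ((var.toNat / 10 : Nat) : Int) := by
    rw [hvar]; exact_mod_cast PySem.Int.floordiv_natCast var.toNat 10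
  have hlt : var.toNat / 10 < 10 ^ k := by
    have h1 : var.toNat / 10 ≤ k := by omega
    have h2 : k < 10 ^ k := Nat.lt_pow_self (by norm_num)
    omega
  rw [hk] at hfd hlt ⊢
  simp only [bound_calc_loop1, hpos, if_true]
  have h0 : (if (0:Int) > 0 then (0:Int) * 10 + PySem.Int.mod var 10 else 0) = 0 := by norm_num
  rw [h0, pvLoop1_eq_loop2 k _ _ (0+1) (by norm_num), hfd, pvLoop2_spec _ _ _ hlt]
  ring

-- ===== VERDICT (by name: the statement is the Claim_ definition above) =====
theorem bound_calc_spec : Claim_unchanged_bound_calc := by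
  intro var _ hpre
  unfold Pre_bound_calc at hpre
  unfold Spec_bound_calc
  intro hD
  unfold D_bound_calc at hD
  set q : Nat := var.toNat / 10 with hq
  have hq1 : 1 ≤ q := by rw [hq]; omega
  have hfd : PySem.Int.floordiv var 10 = (q : Int) := by
    have hvar : var = ((var.toNat : Nat) : Int) := by omega
    rw [hvar]; exact_mod_cast PySem.Int.floordiv_natCast var.toNat 10
  have hq10 : q % 10 ≠ 0 := by
    by_cases hbig : 100 ≤ var
    · intro hc
      apply hD
      refine ⟨hbig, ?_⟩
      rw [hfd]
      have : PySem.Int.mod (q : Int) 10 = ((q % 10 : Nat) : Int) := by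
        exact_mod_cast PySem.Int.mod_natCast q 10
      rw [this, hc]; rfl
    · have : q ≤ 9 := by rw [hq]; omega
      omega
  have hbf : bound_calc_loop1 var.toNat var 0 0 = (pvRev q : Int) :=
    pvBound_final_eq var hpre
  have htn : ((pvRev q : Int)).toNat = pvRev q := Int.toNat_natCast _
  have hlt2 : pvRev q < 10 ^ pvRev q := Nat.lt_pow_self (by norm_num)
  have hbsf : bound_calc_loop2 ((pvRev q : Int)).toNat ((pvRev q : Int)) 0 = (q : Int) := by
    rw [htn, pvLoop2_spec _ _ _ hlt2, pvRev_rev q hq1 hq10]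
    ring
  show bound_calc var = bound_calc_alt var
  unfold bound_calc bound_calc_alt
  rw [hbf]
  show PySem.Int.floordiv var
      (bound_calc_loop2 ((pvRev q : Int)).toNat ((pvRev q : Int)) 0)
    = PySem.Int.floordiv var (PySem.Int.floordiv var 10)
  rw [hbsf, hfd]

theorem bound_calc_changed : Claim_changed_bound_calc := by
  unfold Claim_changed_bound_calc; decide
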